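-- pv_equiv track=rewrite | github.com/tarun-sri-sai/todo-mcp | lib/todo_parser.py | _is_heading_block
-- ===== SOURCE A (Python) =====
-- def _is_heading_block(block):
--     if len(block) != 3 or len(block[0]) != 32 or block[0][0] != "*":
--         return False
--
--     start = set(block[0])
--     end = set(block[-1])
--
--     return (
--         all(l == l.lstrip() and l for l in block) and
--         len(start) == len(end) == 1 and
--         start == end and
--         len(block[0]) == len(block[-1])
--     )
-- ===== SOURCE B (Python) =====
-- def _is_heading_block(block):
--     bar = "*" * 32
--     if len(block) != 3 or block[0] != bar or block[2] != bar:
--         return False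
--     mid = block[1]
--     return bool(mid) and not mid[0].isspace()
-- ===== Notes on version B (the rewrite author's own statement) =====
-- stated objective: simpler
-- what changed: B removes both the distinct-character-set construction and the all() loop over the lines: it compares the first and last lines directly to the constant '*'*32 (which makes their lstrip/non-empty test vacuous) and reduces the remaining per-line test to a single head-character isspace check on the middle line.
import Mathlib
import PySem

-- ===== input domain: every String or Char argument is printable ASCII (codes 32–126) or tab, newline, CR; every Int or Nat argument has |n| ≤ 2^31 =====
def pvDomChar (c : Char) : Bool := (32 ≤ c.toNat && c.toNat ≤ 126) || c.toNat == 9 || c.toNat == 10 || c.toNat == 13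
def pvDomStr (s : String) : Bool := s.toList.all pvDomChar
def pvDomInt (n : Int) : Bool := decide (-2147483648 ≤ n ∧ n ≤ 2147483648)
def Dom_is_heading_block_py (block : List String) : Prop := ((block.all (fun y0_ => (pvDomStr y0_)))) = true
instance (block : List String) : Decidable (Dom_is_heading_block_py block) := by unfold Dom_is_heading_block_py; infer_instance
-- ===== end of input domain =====

-- B drops A's set construction AND the all() loop over the lines: it compares the delimiter lines
-- to the constant '*'*32 and tests only the middle line's first character (objective: simpler).

-- ===== PORT A =====
def is_heading_block_py (block : List String) : Bool :=
  if PySem.List.len block ≠ 3 then false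
  else
    let b0 := PySem.List.pyGetD block 0 ""
    if PySem.Str.len b0 ≠ 32 then false
    else if PySem.Str.pyGet? b0 0 ≠ some '*' then false
    else
      let start : PySem.Set Char := PySem.Set.ofList b0.toList
      let bend : PySem.Set Char := PySem.Set.ofList (PySem.List.pyGetD block (-1) "").toList
      (block.all (fun l => decide (l.toList = (PySem.Str.lstrip l).toList) && !(l.toList == [])))
        && (PySem.Set.len start == PySem.Set.len bend && PySem.Set.len bend == 1)
        && PySem.Set.equal start bend
        && (PySem.Str.len b0 == PySem.Str.len (PySem.List.pyGetD block (-1) ""))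

-- ===== PORT B =====
def is_heading_block_py_alt (block : List String) : Bool :=
  match block with
  | [first, mid, last] =>
    let bar : List Char := List.replicate 32 '*'
    if first.toList == bar && last.toList == bar then
      match mid.toList with
      | [] => false
      | c :: _ => !PySem.Chars.isspace c
    else false
  | _ => false

-- ===== PRECONDITION & SPEC =====
def Spec_is_heading_block_py (block : List String) (out : Bool) : Prop := out = is_heading_block_py_alt block
instance (block : List String) (out : Bool) : Decidable (Spec_is_heading_block_py block out) := by unfold Spec_is_heading_block_py; infer_instance

-- ===== CLAIM (what is proved, stated in full; the proofs are below) =====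
def Claim_equal_is_heading_block_py : Prop := ∀ (block : List String), Dom_is_heading_block_py block → Spec_is_heading_block_py block (is_heading_block_py block)

-- ===== LEMMAS AND PROOFS =====

theorem pv_setlen_one {α : Type} [DecidableEq α] (cs : List α) (c : α) (hc : c ∈ cs)
    (h1 : (PySem.Set.ofList cs).length = 1) : ∀ x ∈ cs, x = c := by
  intro x hx
  rcases List.length_eq_one_iff.mp h1 with ⟨d, hd⟩
  have hcd : c = d := by
    have : c ∈ PySem.Set.ofList cs := (PySem.Set.mem_ofList cs c).mpr hc
    rw [hd] at this; simpa using this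
  have : x ∈ PySem.Set.ofList cs := (PySem.Set.mem_ofList cs x).mpr hx
  rw [hd] at this; simp at this; rw [this, hcd]

-- A's per-line test (l == l.lstrip() and l) holds iff l starts with a non-whitespace character.
theorem pv_lstrip_iff (l : List Char) :
    (l = PySem.Chars.lstrip l ∧ l ≠ []) ↔
      ∃ c t, l = c :: t ∧ PySem.Chars.isspace c = false := by
  cases l with
  | nil => simp
  | cons c t =>
    show (c :: t = (c :: t).dropWhile PySem.Chars.isspace ∧ _) ↔ _
    rw [List.dropWhile_cons]
    constructor
    · rintro ⟨h, -⟩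
      refine ⟨c, t, rfl, ?_⟩
      by_contra hs
      rw [if_pos (by simpa using hs)] at h
      have := List.length_dropWhile_le PySem.Chars.isspace t
      have := congrArg List.length h
      simp at this; omega
    · rintro ⟨c', t', he, hs⟩
      cases he
      rw [if_neg (by simp [hs])]
      exact ⟨rfl, by simp⟩

-- Core case: on a three-line block, A's set-based test agrees with B's constant comparison.
theorem pv_main (a b c : String) :
    is_heading_block_py [a,b,c] = is_heading_block_py_alt [a,b,c] := by
  have hget0 : PySem.List.pyGetD [a,b,c] 0 "" = a := PySem.List.pyGetD_zero_cons a [b,c] ""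
  have hgetl : PySem.List.pyGetD [a,b,c] (-1) "" = c := by
    rw [PySem.List.pyGetD_neg_one _ _ (by simp)]; simp
  simp only [is_heading_block_py, is_heading_block_py_alt, hget0, hgetl,
    PySem.List.len_eq, PySem.Str.len_eq, List.length_cons, List.length_nil]
  norm_num
  rw [Bool.eq_iff_iff]
  simp only [Bool.and_eq_true, decide_eq_true_eq, beq_iff_eq, Bool.not_eq_true',
    and_assoc, PySem.Set.equal_iff, PySem.Set.mem_ofList]
  constructor
  · rintro ⟨h32, hhd, ha2, ha1, hb2, hb1, hc2, hc1, hSE, hE1, heq, hlen⟩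
    have hmem : '*' ∈ a.toList := by
      rw [PySem.List.pyGet?_zero] at hhd
      exact List.mem_of_getElem? hhd
    have hS1 : ((PySem.Set.ofList a.toList).length : Int) = 1 := hSE.trans hE1
    have hA : a.toList = List.replicate 32 '*' := by
      rw [List.eq_replicate_iff]
      exact ⟨by rw [String.length_toList]; exact_mod_cast h32,
        pv_setlen_one a.toList '*' hmem (by exact_mod_cast hS1)⟩
    have hC : c.toList = List.replicate 32 '*' := by
      rw [List.eq_replicate_iff]
      constructor
      · rw [String.length_toList]; omega
      · intro x hx
        have : x ∈ a.toList := (heq x).mpr hx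
        rw [hA] at this; exact (List.eq_of_mem_replicate this)
    rcases (pv_lstrip_iff b.toList).mp ⟨hb2, by simpa using hb1⟩ with ⟨c0, t0, hbt, hsp⟩
    exact ⟨hA, hC, by rw [hbt]; simp [hsp]⟩
  · rintro ⟨hA, hC, hBmid⟩
    obtain ⟨c0, t0, hbt, hsp⟩ : ∃ c0 t0, b.toList = c0 :: t0 ∧ PySem.Chars.isspace c0 = false := by
      cases hbl : b.toList with
      | nil => rw [hbl] at hBmid; exact absurd hBmid (by simp)
      | cons c0 t0 =>
        rw [hbl] at hBmid
        exact ⟨c0, t0, rfl, by simpa using hBmid⟩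
    have hbmid := (pv_lstrip_iff b.toList).mpr ⟨c0, t0, hbt, hsp⟩
    have hSa : PySem.Set.ofList a.toList = ['*'] := by rw [hA]; decide
    have hSc : PySem.Set.ofList c.toList = ['*'] := by rw [hC]; decide
    have h32 : a.length = 32 := by rw [← String.length_toList, hA]; simp
    have h32c : c.length = 32 := by rw [← String.length_toList, hC]; simp
    have habar : a.toList = PySem.Chars.lstrip a.toList ∧ a.toList ≠ [] := by
      rw [hA]; exact ⟨by decide, by decide⟩
    have hcbar : c.toList = PySem.Chars.lstrip c.toList ∧ c.toList ≠ [] := by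
      rw [hC]; exact ⟨by decide, by decide⟩
    refine ⟨by exact_mod_cast h32, ?_, habar.1, by simpa using habar.2, hbmid.1,
      by simpa using hbmid.2, hcbar.1, by simpa using hcbar.2, ?_, ?_, ?_, ?_⟩
    · rw [PySem.List.pyGet?_zero, hA]; decide
    · rw [hSa, hSc]
    · rw [hSc]; decide
    · intro x; rw [hA, hC]
    · omega

-- Blocks whose length is not 3 are rejected by both programs.
theorem pv_tail (a b c d : String) (t : List String) :
    is_heading_block_py (a :: b :: c :: d :: t) = is_heading_block_py_alt (a :: b :: c :: d :: t) := by
  simp [is_heading_block_py, is_heading_block_py_alt]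
  omega

-- ===== VERDICT (by name: the statement is the Claim_ definition above) =====
theorem is_heading_block_py_spec : Claim_equal_is_heading_block_py := by
  intro block _
  unfold Spec_is_heading_block_py
  match block with
  | [] => decide
  | [a] => simp [is_heading_block_py, is_heading_block_py_alt]
  | [a, b] => simp [is_heading_block_py, is_heading_block_py_alt]
  | [a, b, c] => exact pv_main a b c
  | a :: b :: c :: d :: t => exact pv_tail a b c d t
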